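-- pv_equiv track=rewrite | github.com/dsocial118/SISOC | scripts/ci/pr_doc_automation.py | build_architecture_notes
-- ===== SOURCE A (Python) =====
-- def build_architecture_notes(changed_files: list[str]) -> list[str]:
--     """Genera notas arquitectónicas simples a partir de rutas tocadas."""
--
--     notes: list[str] = []
--     if any("/services/" in path for path in changed_files):
--         notes.append(
--             "El PR toca lógica en `services/`, por lo que impacta reglas de negocio u orquestación."
--         )
--     if any(path.endswith("api_views.py") or "/api_" in path for path in changed_files):
--         notes.append(
--             "Hay cambios en capa API/DRF y conviene revisar contratos de request/response."
--         )
--     if any(path.endswith("views.py") for path in changed_files):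
--         notes.append(
--             "Hay cambios en vistas web y puede existir impacto en permisos o renderizado."
--         )
--     if any(
--         "/templates/" in path or path.startswith("templates/") for path in changed_files
--     ):
--         notes.append(
--             "Se modifican templates, con posible impacto visual o de composición UI."
--         )
--     if any(
--         path.endswith("models.py") or "/migrations/" in path for path in changed_files
--     ):
--         notes.append(
--             "Existen cambios de persistencia o migraciones que requieren revisión de datos."
--         )
--     if any(path.startswith(".github/") for path in changed_files):
--         notes.append("El alcance incluye automatización o tooling de CI/CD.")
--     if not notes:
--         notes.append(
--             "No se detectó un patrón arquitectónico dominante más allá del diff observado."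
--         )
--     return notes
-- ===== SOURCE B (Python) =====
-- def build_architecture_notes(changed_files: list[str]) -> list[str]:
--     """Genera notas arquitectónicas simples a partir de rutas tocadas."""
--     svc = api = views = tmpl = models = ci = False
--     for path in changed_files:
--         svc = svc | ("/services/" in path)
--         api = api | (path.endswith("api_views.py") or "/api_" in path)
--         views = views | path.endswith("views.py")
--         tmpl = tmpl | ("/templates/" in path or path.startswith("templates/"))
--         models = models | (path.endswith("models.py") or "/migrations/" in path)
--         ci = ci | path.startswith(".github/")
--     notes = []
--     if svc:
--         notes.append(
--             "El PR toca lógica en `services/`, por lo que impacta reglas de negocio u orquestación."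
--         )
--     if api:
--         notes.append(
--             "Hay cambios en capa API/DRF y conviene revisar contratos de request/response."
--         )
--     if views:
--         notes.append(
--             "Hay cambios en vistas web y puede existir impacto en permisos o renderizado."
--         )
--     if tmpl:
--         notes.append(
--             "Se modifican templates, con posible impacto visual o de composición UI."
--         )
--     if models:
--         notes.append(
--             "Existen cambios de persistencia o migraciones que requieren revisión de datos."
--         )
--     if ci:
--         notes.append("El alcance incluye automatización o tooling de CI/CD.")
--     return notes or [
--         "No se detectó un patrón arquitectónico dominante más allá del diff observado."
--     ]
-- ===== Notes on version B (the rewrite author's own statement) =====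
-- stated objective: alternative
-- what changed: Six separate any(...) scans over changed_files are replaced by a single pass maintaining six boolean flags (OR-accumulated), with the notes emitted afterwards from the flags in the original order.
import Mathlib
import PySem

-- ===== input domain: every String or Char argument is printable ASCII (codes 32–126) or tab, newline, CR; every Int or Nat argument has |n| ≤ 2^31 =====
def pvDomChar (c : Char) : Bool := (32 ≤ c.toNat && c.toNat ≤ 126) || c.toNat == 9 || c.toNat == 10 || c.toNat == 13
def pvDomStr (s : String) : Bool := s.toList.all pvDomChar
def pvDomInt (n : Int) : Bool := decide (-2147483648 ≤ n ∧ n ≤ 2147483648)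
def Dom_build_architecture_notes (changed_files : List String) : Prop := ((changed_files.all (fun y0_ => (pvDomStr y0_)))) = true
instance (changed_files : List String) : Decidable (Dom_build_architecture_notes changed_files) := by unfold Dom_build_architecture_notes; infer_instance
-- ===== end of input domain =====

-- ===== PORT A =====
-- B replaces A's six separate any(...) scans with a single pass over the list
-- maintaining six OR-accumulated boolean flags (objective: alternative decomposition).
def nS : String := "El PR toca lógica en `services/`, por lo que impacta reglas de negocio u orquestación."
def nA : String := "Hay cambios en capa API/DRF y conviene revisar contratos de request/response."
def nV : String := "Hay cambios en vistas web y puede existir impacto en permisos o renderizado."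
def nT : String := "Se modifican templates, con posible impacto visual o de composición UI."
def nM : String := "Existen cambios de persistencia o migraciones que requieren revisión de datos."
def nC : String := "El alcance incluye automatización o tooling de CI/CD."
def nF : String := "No se detectó un patrón arquitectónico dominante más allá del diff observado."

def pS (path : String) : Bool := PySem.Str.isIn "/services/" path
def pA (path : String) : Bool := PySem.Str.endswith path "api_views.py" || PySem.Str.isIn "/api_" path
def pV (path : String) : Bool := PySem.Str.endswith path "views.py"
def pT (path : String) : Bool := PySem.Str.isIn "/templates/" path || PySem.Str.startswith path "templates/"
def pM (path : String) : Bool := PySem.Str.endswith path "models.py" || PySem.Str.isIn "/migrations/" path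
def pC (path : String) : Bool := PySem.Str.startswith path ".github/"

def build_architecture_notes (changed_files : List String) : List String :=
  let notes : List String := []
  let notes := if changed_files.any (fun path => pS path) then notes ++ [nS] else notes
  let notes := if changed_files.any (fun path => pA path) then notes ++ [nA] else notes
  let notes := if changed_files.any (fun path => pV path) then notes ++ [nV] else notes
  let notes := if changed_files.any (fun path => pT path) then notes ++ [nT] else notes
  let notes := if changed_files.any (fun path => pM path) then notes ++ [nM] else notes
  let notes := if changed_files.any (fun path => pC path) then notes ++ [nC] else notes
  let notes := if notes.isEmpty then notes ++ [nF] else notes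
  notes

-- ===== PORT B =====
def Flags := Bool × Bool × Bool × Bool × Bool × Bool

def stepFlags (f : Flags) (path : String) : Flags :=
  (f.1 || pS path, f.2.1 || pA path, f.2.2.1 || pV path,
   f.2.2.2.1 || pT path, f.2.2.2.2.1 || pM path, f.2.2.2.2.2 || pC path)

def flagNotes (f : Flags) : List String :=
  let notes : List String := []
  let notes := if f.1 then notes ++ [nS] else notes
  let notes := if f.2.1 then notes ++ [nA] else notes
  let notes := if f.2.2.1 then notes ++ [nV] else notes
  let notes := if f.2.2.2.1 then notes ++ [nT] else notes
  let notes := if f.2.2.2.2.1 then notes ++ [nM] else notes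
  let notes := if f.2.2.2.2.2 then notes ++ [nC] else notes
  notes

def build_architecture_notes_alt (changed_files : List String) : List String :=
  let f : Flags := changed_files.foldl stepFlags (false, false, false, false, false, false)
  let notes := flagNotes f
  if notes.isEmpty then [nF] else notes

-- ===== PRECONDITION & SPEC =====
def Spec_build_architecture_notes (changed_files : List String) (out : List String) : Prop := out = build_architecture_notes_alt changed_files
instance (changed_files : List String) (out : List String) : Decidable (Spec_build_architecture_notes changed_files out) := by unfold Spec_build_architecture_notes; infer_instance

-- ===== CLAIM (what is proved, stated in full; the proofs are below) =====
def Claim_equal_build_architecture_notes : Prop := ∀ (changed_files : List String), Dom_build_architecture_notes changed_files → Spec_build_architecture_notes changed_files (build_architecture_notes changed_files)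

-- ===== LEMMAS AND PROOFS =====
theorem foldl_stepFlags (cf : List String) (f : Flags) :
    cf.foldl stepFlags f =
      (f.1 || cf.any (fun p => pS p), f.2.1 || cf.any (fun p => pA p),
       f.2.2.1 || cf.any (fun p => pV p), f.2.2.2.1 || cf.any (fun p => pT p),
       f.2.2.2.2.1 || cf.any (fun p => pM p), f.2.2.2.2.2 || cf.any (fun p => pC p)) := by
  induction cf generalizing f with
  | nil => simp
  | cons x xs ih =>
    simp [List.foldl, ih, stepFlags, Bool.or_assoc]

-- ===== VERDICT (by name: the statement is the Claim_ definition above) =====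
theorem build_architecture_notes_spec : Claim_equal_build_architecture_notes := by
  intro changed_files _
  unfold Spec_build_architecture_notes build_architecture_notes build_architecture_notes_alt
  rw [foldl_stepFlags]
  simp only [Bool.false_or]
  generalize changed_files.any (fun p => pS p) = b1
  generalize changed_files.any (fun p => pA p) = b2
  generalize changed_files.any (fun p => pV p) = b3
  generalize changed_files.any (fun p => pT p) = b4
  generalize changed_files.any (fun p => pM p) = b5
  generalize changed_files.any (fun p => pC p) = b6
  cases b1 <;> cases b2 <;> cases b3 <;> cases b4 <;> cases b5 <;> cases b6 <;> rfl
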